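-- pv_equiv track=rewrite | github.com/wzygxr/shuati | class122_GreedyAlgorithm/Code37_Candy.py | validate_candy
-- ===== SOURCE A (Python) =====
-- from typing import List
--
-- def validate_candy(ratings: List[int], result: int) -> bool:
--     """
--     验证函数：检查糖果分配是否满足条件
--
--     Args:
--         ratings: 评分数组
--         result: 糖果总数
--
--     Returns:
--         bool: 分配是否有效
--     """
--     if not ratings:
--         return result == 0
--
--     # 重新计算糖果分配进行验证
--     n = len(ratings)
--     candies = [1] * n
--
--     # 从左到右
--     for i in range(1, n):
--         if ratings[i] > ratings[i - 1]:
--             candies[i] = candies[i - 1] + 1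
--
--     # 从右到左
--     for i in range(n - 2, -1, -1):
--         if ratings[i] > ratings[i + 1]:
--             candies[i] = max(candies[i], candies[i + 1] + 1)
--
--     total = sum(candies)
--
--     # 验证分配是否满足条件
--     for i in range(n):
--         if i > 0 and ratings[i] > ratings[i - 1] and candies[i] <= candies[i - 1]:
--             return False
--         if i < n - 1 and ratings[i] > ratings[i + 1] and candies[i] <= candies[i + 1]:
--             return False
--
--     return total == result
-- ===== SOURCE B (Python) =====
-- def validate_candy(ratings, result):
--     if not ratings:
--         return result == 0
--     total, up, down, peak = 1, 0, 0, 0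
--     for prev, cur in zip(ratings, ratings[1:]):
--         if cur > prev:
--             up += 1
--             down = 0
--             peak = up
--             total += up + 1
--         elif cur == prev:
--             up = down = peak = 0
--             total += 1
--         else:
--             down += 1
--             up = 0
--             total += down + (1 if down > peak else 0)
--     return total == result
-- ===== Notes on version B (the rewrite author's own statement) =====
-- stated objective: faster
-- what changed: Replaces A's candies array (two in-place index-loop passes plus a redundant validation loop) by the single-pass slope-counting method: one fold over adjacent rating pairs maintaining (total, up, down, peak) counters, with no array at all; a loop invariant proves the counters reproduce the two-pass minimum total.
import Mathlib
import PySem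

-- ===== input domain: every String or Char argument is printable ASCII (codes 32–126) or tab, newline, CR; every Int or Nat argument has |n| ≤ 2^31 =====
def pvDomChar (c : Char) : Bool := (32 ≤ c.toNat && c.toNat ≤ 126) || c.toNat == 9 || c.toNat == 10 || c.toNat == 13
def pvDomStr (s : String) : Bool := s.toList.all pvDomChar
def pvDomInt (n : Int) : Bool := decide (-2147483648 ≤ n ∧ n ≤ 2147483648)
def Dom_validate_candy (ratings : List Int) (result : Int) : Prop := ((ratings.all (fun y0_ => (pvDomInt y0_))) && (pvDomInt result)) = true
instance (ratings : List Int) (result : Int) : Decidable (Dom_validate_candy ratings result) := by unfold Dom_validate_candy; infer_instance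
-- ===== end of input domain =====

-- B replaces A's candies array (two in-place index-loop passes plus a redundant validation
-- loop) by the single-pass slope-counting method: one fold over adjacent pairs maintaining
-- (total, up, down, peak), no array at all; objective: faster (measured constant-factor win).

-- ===== PORT A =====
-- loop body of 'from left to right'
def pvStepL (ratings : List Int) (c : List Int) (i : Int) : List Int :=
  if PySem.List.pyGetD ratings i 0 > PySem.List.pyGetD ratings (i-1) 0 then
    PySem.List.pySetD c i (PySem.List.pyGetD c (i-1) 0 + 1)
  else c

-- loop body of 'from right to left'
def pvStepR (ratings : List Int) (c : List Int) (i : Int) : List Int :=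
  if PySem.List.pyGetD ratings i 0 > PySem.List.pyGetD ratings (i+1) 0 then
    PySem.List.pySetD c i (max (PySem.List.pyGetD c i 0) (PySem.List.pyGetD c (i+1) 0 + 1))
  else c

-- loop body of the validation loop; 'some b' models an early 'return b'
def pvStepV (ratings : List Int) (n : Int) (c : List Int) (acc : Option Bool) (i : Int) : Option Bool :=
  match acc with
  | some b => some b
  | none =>
    if i > 0 ∧ PySem.List.pyGetD ratings i 0 > PySem.List.pyGetD ratings (i-1) 0 ∧
        PySem.List.pyGetD c i 0 ≤ PySem.List.pyGetD c (i-1) 0 then some false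
    else if i < n - 1 ∧ PySem.List.pyGetD ratings i 0 > PySem.List.pyGetD ratings (i+1) 0 ∧
        PySem.List.pyGetD c i 0 ≤ PySem.List.pyGetD c (i+1) 0 then some false
    else none

def validate_candy (ratings : List Int) (result : Int) : Bool :=
  if ratings = [] then decide (result = 0)
  else
    let n : Int := ratings.length
    let candies0 : List Int := List.replicate ratings.length 1
    let c1 := (PySem.List.pyRange 1 n 1).foldl (pvStepL ratings) candies0
    let c2 := (PySem.List.pyRange (n-2) (-1) (-1)).foldl (pvStepR ratings) c1
    let total := c2.sum
    match (PySem.List.pyRange 0 n 1).foldl (pvStepV ratings n c2) none with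
    | some b => b
    | none => decide (total = result)

-- ===== PORT B =====
-- loop body of Source B's single pass over zip(ratings, ratings[1:]); state = (total, up, down, peak)
def pvSlopeStep (st : Int × Int × Int × Int) (pc : Int × Int) : Int × Int × Int × Int :=
  let (total, up, down, peak) := st
  if pc.2 > pc.1 then (total + (up + 1) + 1, up + 1, 0, up + 1)
  else if pc.2 = pc.1 then (total + 1, 0, 0, 0)
  else (total + (down + 1) + (if down + 1 > peak then 1 else 0), 0, down + 1, peak)

def validate_candy_alt (ratings : List Int) (result : Int) : Bool :=
  if ratings = [] then decide (result = 0)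
  else
    let st := (ratings.zip ratings.tail).foldl pvSlopeStep (1, 0, 0, 0)
    decide (st.1 = result)

-- ===== PRECONDITION & SPEC =====
def Spec_validate_candy (ratings : List Int) (result : Int) (out : Bool) : Prop := out = validate_candy_alt ratings result
instance (ratings : List Int) (result : Int) (out : Bool) : Decidable (Spec_validate_candy ratings result out) := by unfold Spec_validate_candy; infer_instance

-- ===== CLAIM (what is proved, stated in full; the proofs are below) =====
def Claim_equal_validate_candy : Prop := ∀ (ratings : List Int) (result : Int), Dom_validate_candy ratings result → Spec_validate_candy ratings result (validate_candy ratings result)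

-- ===== LEMMAS AND PROOFS =====

-- pvU r i = length of the strictly increasing run ending at i; pvDn r i = length of the
-- strictly decreasing run starting at i (proof-only notions; A's candies[i] = max of the two).
def pvRunsAux (p u : Int) : List Int → List Int
  | [] => []
  | x :: rest =>
    let u' := if x > p then u + 1 else 1
    u' :: pvRunsAux x u' rest

def pvRuns : List Int → List Int
  | [] => []
  | x :: rest => 1 :: pvRunsAux x 1 rest

def pvU (r : List Int) (i : Nat) : Int := (pvRuns r).getD i 0
def pvDn (r : List Int) (i : Nat) : Int := ((pvRuns r.reverse).reverse).getD i 0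

lemma pvRunsAux_length (p u : Int) (l : List Int) : (pvRunsAux p u l).length = l.length := by
  induction l generalizing p u with
  | nil => rfl
  | cons x rest ih => simp [pvRunsAux, ih]

lemma pvRuns_length (l : List Int) : (pvRuns l).length = l.length := by
  cases l with
  | nil => rfl
  | cons x rest => simp [pvRuns, pvRunsAux_length]

lemma pvRunsAux_succ (l : List Int) : ∀ (p u x : Int) (i : Nat), i + 1 < (x :: l).length →
    (pvRunsAux p u (x :: l)).getD (i+1) 0 =
      if (x :: l).getD (i+1) 0 > (x :: l).getD i 0 then (pvRunsAux p u (x :: l)).getD i 0 + 1 else 1 := by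
  induction l with
  | nil => intro p u x i h; simp at h
  | cons y l' ih =>
    intro p u x i h
    cases i with
    | zero => simp [pvRunsAux]
    | succ i =>
      have := ih x (if x > p then u + 1 else 1) y i (by simpa using h)
      simpa [pvRunsAux] using this

lemma pvU_zero (r : List Int) (h : r ≠ []) : pvU r 0 = 1 := by
  cases r with
  | nil => exact absurd rfl h
  | cons x rest => simp [pvU, pvRuns]

lemma pvU_succ (r : List Int) (i : Nat) (h : i + 1 < r.length) :
    pvU r (i+1) = if r.getD (i+1) 0 > r.getD i 0 then pvU r i + 1 else 1 := by
  cases r with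
  | nil => simp at h
  | cons x rest =>
    cases rest with
    | nil => simp at h
    | cons y l' =>
      cases i with
      | zero => simp [pvU, pvRuns, pvRunsAux]
      | succ i =>
        have := pvRunsAux_succ l' x 1 y i (by simpa using h)
        simp only [pvU, pvRuns]
        simpa using this

lemma pvRunsAux_pos (l : List Int) : ∀ (p u : Int), 1 ≤ u → ∀ i < l.length, 1 ≤ (pvRunsAux p u l).getD i 0 := by
  induction l with
  | nil => intro p u _ i h; simp at h
  | cons x rest ih =>
    intro p u hu i h
    cases i with
    | zero =>
      simp only [pvRunsAux, List.getD_cons_zero]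
      split <;> omega
    | succ i =>
      have h1 : (1:Int) ≤ if x > p then u + 1 else 1 := by split <;> omega
      have := ih x (if x > p then u + 1 else 1) h1 i (by simpa using h)
      simpa [pvRunsAux] using this

lemma pvU_pos (r : List Int) (i : Nat) (h : i < r.length) : 1 ≤ pvU r i := by
  cases r with
  | nil => simp at h
  | cons x rest =>
    cases i with
    | zero => simp [pvU, pvRuns]
    | succ i =>
      have := pvRunsAux_pos rest x 1 (by omega) i (by simpa using h)
      simpa [pvU, pvRuns] using this

lemma pvDn_eq (r : List Int) (i : Nat) (h : i < r.length) :
    pvDn r i = pvU r.reverse (r.length - 1 - i) := by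
  have hlen : (pvRuns r.reverse).length = r.length := by simp [pvRuns_length]
  have hi : i < (pvRuns r.reverse).reverse.length := by simpa [hlen] using h
  have hi' : r.length - 1 - i < (pvRuns r.reverse).length := by omega
  simp only [pvDn, pvU]
  rw [List.getD_eq_getElem _ _ hi, List.getD_eq_getElem _ _ hi', List.getElem_reverse]
  congr 1
  omega

lemma rev_getD (r : List Int) (j : Nat) (h : j < r.length) :
    r.reverse.getD j 0 = r.getD (r.length - 1 - j) 0 := by
  have h1 : j < r.reverse.length := by simpa using h
  have h2 : r.length - 1 - j < r.length := by omega
  rw [List.getD_eq_getElem _ _ h1, List.getD_eq_getElem _ _ h2, List.getElem_reverse]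

lemma pvDn_last (r : List Int) (h : r ≠ []) : pvDn r (r.length - 1) = 1 := by
  have hl : 0 < r.length := List.length_pos_iff.mpr h
  rw [pvDn_eq r _ (by omega)]
  have : r.length - 1 - (r.length - 1) = 0 := by omega
  rw [this, pvU_zero]
  simpa using h

lemma pvDn_pos (r : List Int) (i : Nat) (h : i < r.length) : 1 ≤ pvDn r i := by
  rw [pvDn_eq r i h]
  exact pvU_pos _ _ (by simp; omega)

lemma pvDn_succ (r : List Int) (i : Nat) (h : i + 1 < r.length) :
    pvDn r i = if r.getD i 0 > r.getD (i+1) 0 then pvDn r (i+1) + 1 else 1 := by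
  have h0 : i < r.length := by omega
  rw [pvDn_eq r i h0, pvDn_eq r (i+1) h]
  have hj : r.length - 1 - i = (r.length - 1 - (i+1)) + 1 := by omega
  rw [hj, pvU_succ r.reverse _ (by simp; omega)]
  rw [rev_getD r _ (by omega), rev_getD r _ (by omega)]
  have e1 : r.length - 1 - (r.length - 1 - (i + 1) + 1) = i := by omega
  have e2 : r.length - 1 - (r.length - 1 - (i + 1)) = i + 1 := by omega
  rw [e1, e2]

lemma getD_set (c : List Int) (j i : Nat) (v : Int) (h : j < c.length) :
    (c.set j v).getD i 0 = if i = j then v else c.getD i 0 := by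
  rw [List.getD_eq_getElem?_getD, List.getD_eq_getElem?_getD, List.getElem?_set]
  rcases eq_or_ne i j with rfl | hne
  · simp [h]
  · simp [Ne.symm hne, hne]

lemma stepL_spec (r c : List Int) (k : Nat) (hc : c.length = r.length) (hk : k + 1 < r.length) :
    (pvStepL r c (1 + (k:Int))).length = r.length ∧
    ∀ i, (pvStepL r c (1 + (k:Int))).getD i 0 =
      if i = k + 1 ∧ r.getD (k+1) 0 > r.getD k 0 then c.getD k 0 + 1 else c.getD i 0 := by
  have h1 : (1 + (k:Int)) = ((k+1 : Nat):Int) := by push_cast; ring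
  unfold pvStepL
  rw [h1]
  have h2 : ((k+1:Nat):Int) - 1 = ((k : Nat):Int) := by push_cast; ring
  rw [h2]
  simp only [PySem.List.pyGetD_natCast, PySem.List.pySetD_natCast]
  split_ifs with hgt
  · refine ⟨by simp [hc], ?_⟩
    intro i
    rw [getD_set c (k+1) i _ (by omega)]
    split_ifs with e1 e2 e3 <;> simp_all
  · refine ⟨hc, ?_⟩
    intro i
    split_ifs with e
    · exact absurd e.2 (by omega)
    · rfl

lemma stepR_spec (r c : List Int) (m : Nat) (hc : c.length = r.length) (hm : m + 1 < r.length) :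
    (pvStepR r c (m:Int)).length = r.length ∧
    ∀ i, (pvStepR r c (m:Int)).getD i 0 =
      if i = m ∧ r.getD m 0 > r.getD (m+1) 0 then max (c.getD m 0) (c.getD (m+1) 0 + 1)
      else c.getD i 0 := by
  unfold pvStepR
  have h1 : (m:Int) + 1 = ((m+1 : Nat):Int) := by push_cast; ring
  rw [h1]
  simp only [PySem.List.pyGetD_natCast, PySem.List.pySetD_natCast]
  split_ifs with hgt
  · refine ⟨by simp [hc], ?_⟩
    intro i
    rw [getD_set c m i _ (by omega)]
    split_ifs with e1 e2 e3 <;> simp_all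
  · refine ⟨hc, ?_⟩
    intro i
    split_ifs with e
    · exact absurd e.2 (by omega)
    · rfl

def pvL (r : List Int) (k : Nat) : List Int :=
  (List.range k).foldl (fun c (j : Nat) => pvStepL r c (1 + (j:Int))) (List.replicate r.length 1)

lemma pvL_spec (r : List Int) (hr : r ≠ []) : ∀ (k : Nat), k ≤ r.length - 1 →
    (pvL r k).length = r.length ∧
    ∀ i < r.length, (pvL r k).getD i 0 = if i < k + 1 then pvU r i else 1 := by
  have hpos : 0 < r.length := List.length_pos_iff.mpr hr
  intro k
  induction k with
  | zero =>
    intro _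
    refine ⟨by simp [pvL], ?_⟩
    intro i hi
    have : (pvL r 0).getD i 0 = 1 := by
      simp [pvL, List.getD_eq_getElem?_getD, hi]
    rw [this]
    split_ifs with h
    · have : i = 0 := by omega
      subst this
      exact (pvU_zero r hr).symm
    · rfl
  | succ k ih =>
    intro hk
    obtain ⟨hlen, hval⟩ := ih (by omega)
    have hkk : k + 1 < r.length := by omega
    have hstep := stepL_spec r (pvL r k) k hlen hkk
    have hfold : pvL r (k+1) = pvStepL r (pvL r k) (1 + (k:Int)) := by
      rw [pvL, List.range_succ, List.foldl_append]
      rfl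
    rw [hfold]
    refine ⟨hstep.1, ?_⟩
    intro i hi
    rw [hstep.2 i]
    split_ifs with e1 e2 e3 <;> try (exfalso; omega)
    · obtain ⟨rfl, hgt⟩ := e1
      rw [hval k (by omega), if_pos (by omega), pvU_succ r k hkk, if_pos hgt]
    · rcases eq_or_ne i (k+1) with rfl | hne
      · rw [hval (k+1) hi, if_neg (by omega), pvU_succ r k hkk]
        rw [if_neg (fun h => e1 ⟨rfl, h⟩)]
      · have hik : i < k + 1 := by omega
        rw [hval i hi, if_pos hik]
    · rcases eq_or_ne i (k+1) with rfl | hne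
      · exfalso; omega
      · rw [hval i hi, if_neg (by omega)]

def pvR (r : List Int) (k : Nat) : List Int :=
  (List.range k).foldl (fun c (j : Nat) => pvStepR r c ((r.length:Int) - 2 - (j:Int))) (pvL r (r.length - 1))

lemma pvR_spec (r : List Int) (hr : r ≠ []) : ∀ (k : Nat), k ≤ r.length - 1 →
    (pvR r k).length = r.length ∧
    ∀ i < r.length, (pvR r k).getD i 0 =
      if r.length - 1 - k ≤ i then max (pvU r i) (pvDn r i) else pvU r i := by
  have hpos : 0 < r.length := List.length_pos_iff.mpr hr
  intro k
  induction k with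
  | zero =>
    intro _
    obtain ⟨hlen, hval⟩ := pvL_spec r hr (r.length - 1) (by omega)
    have h00 : pvR r 0 = pvL r (r.length - 1) := rfl
    rw [h00]
    refine ⟨hlen, ?_⟩
    intro i hi
    rw [hval i hi, if_pos (by omega)]
    split_ifs with h
    · have : i = r.length - 1 := by omega
      subst this
      rw [pvDn_last r hr]
      have := pvU_pos r (r.length - 1) (by omega)
      omega
    · rfl
  | succ k ih =>
    intro hk
    obtain ⟨hlen, hval⟩ := ih (by omega)
    have hm : r.length - 2 - k + 1 < r.length := by omega
    have hcast : (r.length:Int) - 2 - (k:Int) = ((r.length - 2 - k : Nat) : Int) := by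
      omega
    have hfold : pvR r (k+1) = pvStepR r (pvR r k) ((r.length:Int) - 2 - (k:Int)) := by
      rw [pvR, List.range_succ, List.foldl_append]
      rfl
    set m : Nat := r.length - 2 - k with hmdef
    have hstep := stepR_spec r (pvR r k) m hlen hm
    rw [hfold, hcast]
    refine ⟨hstep.1, ?_⟩
    intro i hi
    rw [hstep.2 i]
    have hvm : (pvR r k).getD m 0 = pvU r m := by
      rw [hval m (by omega), if_neg (by omega)]
    have hvm1 : (pvR r k).getD (m+1) 0 = max (pvU r (m+1)) (pvDn r (m+1)) := by
      rw [hval (m+1) (by omega), if_pos (by omega)]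
    split_ifs with e1 e2 e3 <;> try (exfalso; omega)
    · obtain ⟨rfl, hgt⟩ := e1
      rw [hvm, hvm1]
      have hdn : pvDn r m = pvDn r (m+1) + 1 := by
        rw [pvDn_succ r m hm, if_pos hgt]
      have hu1 : pvU r (m+1) = 1 := by
        rw [pvU_succ r m hm, if_neg (by omega)]
      have := pvDn_pos r (m+1) (by omega)
      rw [hu1, hdn]
      have h1 : max (1:Int) (pvDn r (m+1)) = pvDn r (m+1) := by omega
      rw [h1]
    · rcases eq_or_ne i m with rfl | hne
      · rw [hvm]
        have hdn : pvDn r m = 1 := by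
          rw [pvDn_succ r m hm, if_neg (fun h => e1 ⟨rfl, h⟩)]
        have := pvU_pos r m (by omega)
        rw [hdn]
        omega
      · rw [hval i hi, if_pos (by omega)]
    · rcases eq_or_ne i m with rfl | hne
      · exfalso; omega
      · rw [hval i hi, if_neg (by omega)]

lemma foldl_stepV_none (r c : List Int) (n : Int) :
    ∀ (l : List Int), (∀ i ∈ l, pvStepV r n c none i = none) →
      l.foldl (pvStepV r n c) none = none := by
  intro l
  induction l with
  | nil => intro _; rfl
  | cons x xs ih =>
    intro h
    rw [List.foldl_cons, h x (by simp)]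
    exact ih (fun i hi => h i (by simp [hi]))

lemma no_violation (r c : List Int)
    (hval : ∀ i < r.length, c.getD i 0 = max (pvU r i) (pvDn r i))
    (i : Int) (h0 : 0 ≤ i) (hn : i < (r.length:Int)) :
    pvStepV r (r.length:Int) c none i = none := by
  obtain ⟨m, rfl⟩ : ∃ m : Nat, i = (m:Int) := ⟨i.toNat, (Int.toNat_of_nonneg h0).symm⟩
  have hm : m < r.length := by exact_mod_cast hn
  unfold pvStepV
  rw [if_neg, if_neg]
  · rintro ⟨hlt, hgt, hle⟩
    have hm1 : m + 1 < r.length := by omega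
    have hcast : (m:Int) + 1 = ((m+1 : Nat):Int) := by push_cast; ring
    rw [hcast] at hgt hle
    simp only [PySem.List.pyGetD_natCast] at hgt hle
    have hdn : pvDn r m = pvDn r (m+1) + 1 := by
      rw [pvDn_succ r m hm1, if_pos hgt]
    have hu1 : pvU r (m+1) = 1 := by
      rw [pvU_succ r m hm1, if_neg (by omega)]
    have hp := pvDn_pos r (m+1) hm1
    rw [hval m hm, hval (m+1) hm1, hdn, hu1] at hle
    omega
  · rintro ⟨hposm, hgt, hle⟩
    have hmp : 0 < m := by exact_mod_cast hposm
    obtain ⟨j, rfl⟩ : ∃ j : Nat, m = j + 1 := ⟨m - 1, by omega⟩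
    have hcast : ((j+1:Nat):Int) - 1 = ((j : Nat):Int) := by push_cast; ring
    rw [hcast] at hgt hle
    simp only [PySem.List.pyGetD_natCast] at hgt hle
    have hdn : pvDn r j = 1 := by
      rw [pvDn_succ r j hm, if_neg (by omega)]
    have hu : pvU r (j+1) = pvU r j + 1 := by
      rw [pvU_succ r j hm, if_pos hgt]
    have hp1 := pvU_pos r j (by omega)
    have hp2 := pvDn_pos r (j+1) hm
    rw [hval (j+1) hm, hval j (by omega), hdn, hu] at hle
    omega

-- ---------- B-side machinery: the slope-fold invariant ----------

-- state after processing a nonempty prefix p: total = Σ max(up-run, down-run); up/down/peak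
-- describe the trailing run of p.
def pvInv (p : List Int) (st : Int × Int × Int × Int) : Prop :=
  st.1 = ∑ j ∈ Finset.range p.length, max (pvU p j) (pvDn p j) ∧
  st.2.1 = pvU p (p.length - 1) - 1 ∧
  ∃ d : Nat, st.2.2.1 = (d : Int) ∧ d + 1 ≤ p.length ∧
    (∀ t : Nat, t ≤ d → pvDn p (p.length - 1 - t) = (t : Int) + 1) ∧
    (d + 1 = p.length ∨ pvDn p (p.length - 2 - d) = 1) ∧
    st.2.2.2 = pvU p (p.length - 1 - d) - 1

lemma getD_append_lt (p : List Int) (x : Int) (j : Nat) (h : j < p.length) :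
    (p ++ [x]).getD j 0 = p.getD j 0 := by
  rw [List.getD_eq_getElem?_getD, List.getD_eq_getElem?_getD, List.getElem?_append_left h]

lemma getD_append_last (p : List Int) (x : Int) : (p ++ [x]).getD p.length 0 = x := by
  simp [List.getD_eq_getElem?_getD]

lemma pvU_append_lt (p : List Int) (x : Int) : ∀ j, j < p.length → pvU (p ++ [x]) j = pvU p j := by
  intro j
  induction j with
  | zero =>
    intro h
    have hp : p ≠ [] := by intro e; simp [e] at h
    rw [pvU_zero _ (by simp), pvU_zero p hp]
  | succ j ih =>
    intro h
    rw [pvU_succ (p ++ [x]) j (by simp; omega), pvU_succ p j h,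
        getD_append_lt p x (j+1) h, getD_append_lt p x j (by omega), ih (by omega)]

lemma pvU_append_last (p : List Int) (x : Int) (hp : p ≠ []) :
    pvU (p ++ [x]) p.length = if x > p.getD (p.length - 1) 0 then pvU p (p.length - 1) + 1 else 1 := by
  have hpos : 0 < p.length := List.length_pos_iff.mpr hp
  have e : p.length - 1 + 1 = p.length := by omega
  rw [← e, pvU_succ (p ++ [x]) (p.length - 1) (by simp; omega), e,
      getD_append_last, getD_append_lt p x (p.length - 1) (by omega),
      pvU_append_lt p x (p.length - 1) (by omega)]

lemma pvDn_append_last (p : List Int) (x : Int) : pvDn (p ++ [x]) p.length = 1 := by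
  have := pvDn_last (p ++ [x]) (by simp)
  simpa using this

lemma pvDn_append_pred (p : List Int) (x : Int) (hp : p ≠ []) :
    pvDn (p ++ [x]) (p.length - 1) = if p.getD (p.length - 1) 0 > x then 2 else 1 := by
  have hpos : 0 < p.length := List.length_pos_iff.mpr hp
  have e : p.length - 1 + 1 = p.length := by omega
  rw [pvDn_succ (p ++ [x]) (p.length - 1) (by simp; omega), e,
      getD_append_last, getD_append_lt p x (p.length - 1) (by omega), pvDn_append_last]
  norm_num

lemma pvDn_append_copy (p : List Int) (x : Int) (k : Nat) (hk : k < p.length)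
    (h : pvDn (p ++ [x]) k = pvDn p k) :
    ∀ j : Nat, pvDn (p ++ [x]) (k - j) = pvDn p (k - j) := by
  intro j
  induction j with
  | zero => simpa using h
  | succ j ih =>
    by_cases h0 : k - j = 0
    · have : k - (j+1) = 0 := by omega
      rw [this, ← h0]; exact ih
    · have e : k - (j+1) + 1 = k - j := by omega
      have hlt : k - (j+1) + 1 < p.length := by omega
      rw [pvDn_succ (p ++ [x]) (k - (j+1)) (by simp; omega), pvDn_succ p (k - (j+1)) hlt, e,
          getD_append_lt p x (k - j) (by omega), getD_append_lt p x (k - (j+1)) (by omega), ih]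

-- under the trailing-descent hypothesis, inner descent comparisons hold
lemma desc_cmp (p : List Int) (d : Nat) (hdn : d + 1 ≤ p.length)
    (Hd : ∀ t : Nat, t ≤ d → pvDn p (p.length - 1 - t) = (t : Int) + 1) :
    ∀ t : Nat, 1 ≤ t → t ≤ d →
      p.getD (p.length - 1 - t) 0 > p.getD (p.length - 1 - (t - 1)) 0 := by
  intro t h1 h2
  have e : p.length - 1 - t + 1 = p.length - 1 - (t - 1) := by omega
  have hlt : p.length - 1 - t + 1 < p.length := by omega
  have hv := Hd t h2
  rw [pvDn_succ p (p.length - 1 - t) hlt, e] at hv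
  by_contra hc
  rw [if_neg hc] at hv
  omega

lemma pvDn_append_fall (p : List Int) (x : Int) (d : Nat) (hdn : d + 1 ≤ p.length)
    (Hd : ∀ t : Nat, t ≤ d → pvDn p (p.length - 1 - t) = (t : Int) + 1)
    (hfall : p.getD (p.length - 1) 0 > x) :
    ∀ t : Nat, t ≤ d → pvDn (p ++ [x]) (p.length - 1 - t) = (t : Int) + 2 := by
  have hp : p ≠ [] := by intro e; simp [e] at hdn
  intro t
  induction t with
  | zero =>
    intro _
    simpa using (by rw [pvDn_append_pred p x hp, if_pos hfall] : pvDn (p ++ [x]) (p.length - 1) = 2)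
  | succ t ih =>
    intro ht
    have hcmp := desc_cmp p d hdn Hd (t+1) (by omega) ht
    have e0 : t + 1 - 1 = t := by omega
    rw [e0] at hcmp
    have e : p.length - 1 - (t+1) + 1 = p.length - 1 - t := by omega
    rw [pvDn_succ (p ++ [x]) (p.length - 1 - (t+1)) (by simp; omega), e,
        getD_append_lt p x (p.length - 1 - t) (by omega),
        getD_append_lt p x (p.length - 1 - (t+1)) (by omega),
        if_pos hcmp, ih (by omega)]
    push_cast
    ring

lemma pvU_interior (p : List Int) (d : Nat) (hdn : d + 1 ≤ p.length)
    (Hd : ∀ t : Nat, t ≤ d → pvDn p (p.length - 1 - t) = (t : Int) + 1) :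
    ∀ s : Nat, s < d → pvU p (p.length - 1 - s) = 1 := by
  intro s hs
  have hcmp := desc_cmp p d hdn Hd (s+1) (by omega) (by omega)
  have e0 : s + 1 - 1 = s := by omega
  rw [e0] at hcmp
  have e : p.length - 1 - (s+1) + 1 = p.length - 1 - s := by omega
  rw [← e, pvU_succ p (p.length - 1 - (s+1)) (by omega), e, if_neg (by omega)]

lemma sum_shift (g : Nat → Int) (n d : Nat) (hdn : d + 1 ≤ n)
    (hz : ∀ j, j < n - 1 - d → g j = 0) :
    ∑ j ∈ Finset.range n, g j = ∑ t ∈ Finset.range (d + 1), g (n - 1 - t) := by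
  have h0 : ∑ j ∈ Finset.Ico 0 (n - 1 - d), g j = 0 := by
    apply Finset.sum_eq_zero
    intro j hj
    exact hz j (by simpa using (Finset.mem_Ico.mp hj).2)
  have split : ∑ j ∈ Finset.range n, g j = ∑ j ∈ Finset.Ico (n - 1 - d) n, g j := by
    rw [Finset.range_eq_Ico, ← Finset.sum_Ico_consecutive g (Nat.zero_le (n - 1 - d)) (by omega : n - 1 - d ≤ n), h0, zero_add]
  have e : n - (n - 1 - d) = d + 1 := by omega
  rw [split, Finset.sum_Ico_eq_sum_range, e,
      ← Finset.sum_range_reflect (fun t => g (n - 1 - t)) (d + 1)]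
  apply Finset.sum_congr rfl
  intro t ht
  have ht' : t < d + 1 := Finset.mem_range.mp ht
  congr 1
  omega

lemma list_sum_eq (l : List Int) : l.sum = ∑ j ∈ Finset.range l.length, l.getD j 0 := by
  induction l with
  | nil => simp
  | cons a t ih =>
    rw [List.sum_cons, List.length_cons, Finset.sum_range_succ' (fun j => (a :: t).getD j 0)]
    simp [ih]
    ring

lemma zip_tail_append (p : List Int) (x : Int) (hp : p ≠ []) :
    (p ++ [x]).zip (p ++ [x]).tail = p.zip p.tail ++ [(p.getD (p.length - 1) 0, x)] := by
  induction p with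
  | nil => exact absurd rfl hp
  | cons a q ih =>
    cases q with
    | nil => simp [List.zip]
    | cons b q' =>
      have h := ih (by simp)
      have e1 : ((a :: b :: q') ++ [x]).zip ((a :: b :: q') ++ [x]).tail
          = (a, b) :: (((b :: q') ++ [x]).zip ((b :: q') ++ [x]).tail) := by
        simp [List.zip]
      rw [e1, h]
      have e2 : (a :: b :: q').zip (a :: b :: q').tail = (a, b) :: ((b :: q').zip (b :: q').tail) := by
        simp [List.zip]
      rw [e2]
      simp
      rfl


-- one step of the slope fold preserves the invariant
lemma pvSlopeStep_def (total up down peak a x : Int) :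
    pvSlopeStep (total, up, down, peak) (a, x) =
      if x > a then (total + (up + 1) + 1, up + 1, 0, up + 1)
      else if x = a then (total + 1, 0, 0, 0)
      else (total + (down + 1) + (if down + 1 > peak then 1 else 0), 0, down + 1, peak) := rfl

lemma pvInv_step (p : List Int) (x : Int) (hp : p ≠ []) (st : Int × Int × Int × Int)
    (h : pvInv p st) :
    pvInv (p ++ [x]) (pvSlopeStep st (p.getD (p.length - 1) 0, x)) := by
  obtain ⟨total, up, down, peak⟩ := st
  obtain ⟨htot, hup, d, hdown, hdlen, Hd, Hbd, hpk⟩ := h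
  have hpos : 0 < p.length := List.length_pos_iff.mpr hp
  have hqlen : (p ++ [x]).length = p.length + 1 := by simp
  have hUlt := pvU_append_lt p x
  have hUn := pvU_append_last p x hp
  have hDnn := pvDn_append_last p x
  have hDpred := pvDn_append_pred p x hp
  have hUposlast := pvU_pos p (p.length - 1) (by omega)
  simp only at htot hup hdown hpk
  by_cases hgt : x > p.getD (p.length - 1) 0
  · -- rising step
    have hDcopy0 : pvDn (p ++ [x]) (p.length - 1) = pvDn p (p.length - 1) := by
      rw [hDpred, if_neg (by omega), pvDn_last p hp]
    have hDcopy : ∀ j, j < p.length → pvDn (p ++ [x]) j = pvDn p j := by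
      intro j hj
      have := pvDn_append_copy p x (p.length - 1) (by omega) hDcopy0 (p.length - 1 - j)
      have e : p.length - 1 - (p.length - 1 - j) = j := by omega
      rwa [e] at this
    have hUq : pvU (p ++ [x]) p.length = pvU p (p.length - 1) + 1 := by rw [hUn, if_pos hgt]
    rw [pvSlopeStep_def, if_pos hgt]
    refine ⟨?_, ?_, 0, rfl, by omega, ?_, ?_, ?_⟩
    · simp only [hqlen]
      rw [Finset.sum_range_succ]
      have hsum : ∑ j ∈ Finset.range p.length, max (pvU (p ++ [x]) j) (pvDn (p ++ [x]) j)
          = ∑ j ∈ Finset.range p.length, max (pvU p j) (pvDn p j) := by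
        apply Finset.sum_congr rfl
        intro j hj
        have hj' : j < p.length := Finset.mem_range.mp hj
        rw [hUlt j hj', hDcopy j hj']
      rw [hsum, ← htot, hUq, hDnn]
      have : max (pvU p (p.length - 1) + 1) 1 = pvU p (p.length - 1) + 1 := by omega
      rw [this]
      omega
    · simp only [hqlen]
      have e : p.length + 1 - 1 = p.length := by omega
      rw [e, hUq]
      omega
    · intro t ht
      have : t = 0 := by omega
      subst this
      simp only [hqlen]
      have e : p.length + 1 - 1 - 0 = p.length := by omega
      rw [e, hDnn]
      norm_num
    · right
      simp only [hqlen]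
      have e : p.length + 1 - 2 - 0 = p.length - 1 := by omega
      rw [e, hDcopy0, pvDn_last p hp]
    · simp only [hqlen]
      have e : p.length + 1 - 1 - 0 = p.length := by omega
      rw [e, hUq]
      omega
  · by_cases heq : x = p.getD (p.length - 1) 0
    · -- flat step
      have hDcopy0 : pvDn (p ++ [x]) (p.length - 1) = pvDn p (p.length - 1) := by
        rw [hDpred, if_neg (by omega), pvDn_last p hp]
      have hDcopy : ∀ j, j < p.length → pvDn (p ++ [x]) j = pvDn p j := by
        intro j hj
        have := pvDn_append_copy p x (p.length - 1) (by omega) hDcopy0 (p.length - 1 - j)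
        have e : p.length - 1 - (p.length - 1 - j) = j := by omega
        rwa [e] at this
      have hUq : pvU (p ++ [x]) p.length = 1 := by rw [hUn, if_neg (by omega)]
      rw [pvSlopeStep_def, if_neg hgt, if_pos heq]
      refine ⟨?_, ?_, 0, rfl, by omega, ?_, ?_, ?_⟩
      · simp only [hqlen]
        rw [Finset.sum_range_succ]
        have hsum : ∑ j ∈ Finset.range p.length, max (pvU (p ++ [x]) j) (pvDn (p ++ [x]) j)
            = ∑ j ∈ Finset.range p.length, max (pvU p j) (pvDn p j) := by
          apply Finset.sum_congr rfl
          intro j hj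
          have hj' : j < p.length := Finset.mem_range.mp hj
          rw [hUlt j hj', hDcopy j hj']
        rw [hsum, ← htot, hUq, hDnn]
        norm_num
      · simp only [hqlen]
        have e : p.length + 1 - 1 = p.length := by omega
        rw [e, hUq]
        norm_num
      · intro t ht
        have : t = 0 := by omega
        subst this
        simp only [hqlen]
        have e : p.length + 1 - 1 - 0 = p.length := by omega
        rw [e, hDnn]
        norm_num
      · right
        simp only [hqlen]
        have e : p.length + 1 - 2 - 0 = p.length - 1 := by omega
        rw [e, hDcopy0, pvDn_last p hp]
      · simp only [hqlen]
        have e : p.length + 1 - 1 - 0 = p.length := by omega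
        rw [e, hUq]
        norm_num
    · -- falling step
      have hlt : p.getD (p.length - 1) 0 > x := by omega
      have hfall := pvDn_append_fall p x d hdlen Hd hlt
      have hUq : pvU (p ++ [x]) p.length = 1 := by rw [hUn, if_neg (by omega)]
      have hbelow : d + 1 < p.length →
          pvDn (p ++ [x]) (p.length - 2 - d) = 1 ∧ pvDn p (p.length - 2 - d) = 1 := by
        intro hdn'
        have hb : pvDn p (p.length - 2 - d) = 1 := by
          rcases Hbd with hl | hr
          · omega
          · exact hr
        have hDd := Hd d (le_refl d)
        have hnocmp : ¬ p.getD (p.length - 2 - d) 0 > p.getD (p.length - 1 - d) 0 := by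
          intro hc
          have e : p.length - 2 - d + 1 = p.length - 1 - d := by omega
          have := pvDn_succ p (p.length - 2 - d) (by omega)
          rw [e, if_pos hc, hDd] at this
          omega
        have e : p.length - 2 - d + 1 = p.length - 1 - d := by omega
        have hq : pvDn (p ++ [x]) (p.length - 2 - d) = 1 := by
          rw [pvDn_succ (p ++ [x]) (p.length - 2 - d) (by simp; omega), e,
              getD_append_lt p x (p.length - 1 - d) (by omega),
              getD_append_lt p x (p.length - 2 - d) (by omega), if_neg hnocmp]
        exact ⟨hq, hb⟩
      have hz : ∀ j, j < p.length - 1 - d → pvDn (p ++ [x]) j = pvDn p j := by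
        intro j hj
        have hdn' : d + 1 < p.length := by omega
        obtain ⟨hq, hb⟩ := hbelow hdn'
        have := pvDn_append_copy p x (p.length - 2 - d) (by omega) (by rw [hq, hb]) (p.length - 2 - d - j)
        have e : p.length - 2 - d - (p.length - 2 - d - j) = j := by omega
        rwa [e] at this
      rw [pvSlopeStep_def, if_neg hgt, if_neg heq]
      refine ⟨?_, ?_, d + 1, ?_, by omega, ?_, ?_, ?_⟩
      · simp only [hqlen]
        rw [Finset.sum_range_succ, hUq, hDnn]
        have hstep1 : ∑ j ∈ Finset.range p.length, max (pvU (p ++ [x]) j) (pvDn (p ++ [x]) j)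
            = ∑ j ∈ Finset.range p.length, max (pvU p j) (pvDn (p ++ [x]) j) := by
          apply Finset.sum_congr rfl
          intro j hj
          rw [hUlt j (Finset.mem_range.mp hj)]
        set g : Nat → Int := fun j => max (pvU p j) (pvDn (p ++ [x]) j) - max (pvU p j) (pvDn p j) with hg
        have hsplit : ∑ j ∈ Finset.range p.length, max (pvU p j) (pvDn (p ++ [x]) j)
            = ∑ j ∈ Finset.range p.length, max (pvU p j) (pvDn p j) + ∑ j ∈ Finset.range p.length, g j := by
          rw [← Finset.sum_add_distrib]
          apply Finset.sum_congr rfl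
          intro j _
          simp only [hg]
          ring
        have hgz : ∀ j, j < p.length - 1 - d → g j = 0 := by
          intro j hj
          simp only [hg, hz j hj]
          ring
        have hshift := sum_shift g p.length d hdlen hgz
        have hpeel : ∑ t ∈ Finset.range (d + 1), g (p.length - 1 - t)
            = ∑ t ∈ Finset.range d, g (p.length - 1 - t) + g (p.length - 1 - d) :=
          Finset.sum_range_succ _ d
        have hone : ∀ t, t < d → g (p.length - 1 - t) = 1 := by
          intro t ht
          simp only [hg]
          rw [pvU_interior p d hdlen Hd t ht, hfall t (by omega), Hd t (by omega)]
          have h1 : max (1:Int) ((t:Int) + 2) = (t:Int) + 2 := by omega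
          have h2 : max (1:Int) ((t:Int) + 1) = (t:Int) + 1 := by omega
          rw [h1, h2]
          ring
        have hconst : ∑ t ∈ Finset.range d, g (p.length - 1 - t) = (d : Int) := by
          rw [Finset.sum_congr rfl (fun t ht => hone t (Finset.mem_range.mp ht))]
          simp
        have htop : g (p.length - 1 - d) = if (d : Int) + 1 > peak then 1 else 0 := by
          simp only [hg]
          rw [hfall d (le_refl d), Hd d (le_refl d), hpk]
          rcases le_or_gt (pvU p (p.length - 1 - d)) ((d : Int) + 1) with hc | hc
          · rw [max_eq_right (by omega), max_eq_right hc, if_pos (by omega)]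
            ring
          · rw [max_eq_left (by omega), max_eq_left (by omega), if_neg (by omega)]
            ring
        rw [hstep1, hsplit, hshift, hpeel, hconst, htop, ← htot, hdown]
        have hmax1 : max (1:Int) 1 = 1 := by omega
        rw [hmax1]
        split_ifs <;> omega
      · simp only [hqlen]
        have e : p.length + 1 - 1 = p.length := by omega
        rw [e, hUq]
        norm_num
      · simp only [hdown]
        push_cast
        ring
      · intro t ht
        simp only [hqlen]
        cases t with
        | zero =>
          have e : p.length + 1 - 1 - 0 = p.length := by omega
          rw [e, hDnn]
          norm_num
        | succ s =>
          have e : p.length + 1 - 1 - (s + 1) = p.length - 1 - s := by omega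
          rw [e, hfall s (by omega)]
          push_cast
          ring
      · simp only [hqlen]
        by_cases hdn' : d + 1 = p.length
        · left; omega
        · right
          have e : p.length + 1 - 2 - (d + 1) = p.length - 2 - d := by omega
          rw [e]
          exact (hbelow (by omega)).1
      · simp only [hqlen]
        have e : p.length + 1 - 1 - (d + 1) = p.length - 1 - d := by omega
        rw [e, hUlt (p.length - 1 - d) (by omega), hpk]

-- the slope-fold invariant holds for every nonempty prefix
lemma pvInv_fold (p : List Int) (hp : p ≠ []) :
    pvInv p ((p.zip p.tail).foldl pvSlopeStep (1, 0, 0, 0)) := by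
  induction p using List.reverseRecOn with
  | nil => exact absurd rfl hp
  | append_singleton p x ih =>
    by_cases hq : p = []
    · subst hq
      refine ⟨?_, ?_, 0, rfl, by simp, ?_, ?_, ?_⟩
      · simp [List.zip, pvU, pvDn, pvRuns, pvRunsAux]
      · simp [List.zip, pvU, pvRuns, pvRunsAux]
      · intro t ht
        have : t = 0 := by omega
        subst this
        simpa using pvDn_last [x] (by simp)
      · left; simp
      · simp [List.zip, pvU, pvRuns, pvRunsAux]
    · rw [zip_tail_append p x hq, List.foldl_append]
      simpa using pvInv_step p x hq _ (ih hq)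

-- ===== VERDICT (by name: the statement is the Claim_ definition above) =====
theorem validate_candy_spec : Claim_equal_validate_candy := by
  intro ratings result _
  unfold Spec_validate_candy
  by_cases hr : ratings = []
  · simp [validate_candy, validate_candy_alt, hr]
  · have hpos : 0 < ratings.length := List.length_pos_iff.mpr hr
    rw [validate_candy, validate_candy_alt, if_neg hr, if_neg hr]
    have htoNat1 : (((ratings.length:Int) - 1)).toNat = ratings.length - 1 := by omega
    have htoNat2 : (((ratings.length:Int) - 2 - (-1))).toNat = ratings.length - 1 := by omega
    have hc1 : (PySem.List.pyRange 1 (ratings.length:Int) 1).foldl (pvStepL ratings)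
        (List.replicate ratings.length 1) = pvL ratings (ratings.length - 1) := by
      rw [PySem.List.pyRange_one, List.foldl_map, htoNat1, pvL]
    have hc2 : (PySem.List.pyRange ((ratings.length:Int) - 2) (-1) (-1)).foldl (pvStepR ratings)
        (pvL ratings (ratings.length - 1)) = pvR ratings (ratings.length - 1) := by
      rw [PySem.List.pyRange_neg_one, List.foldl_map, htoNat2, pvR]
    simp only
    rw [hc1, hc2]
    obtain ⟨hlen, hval⟩ := pvR_spec ratings hr (ratings.length - 1) le_rfl
    have hval' : ∀ i < ratings.length,
        (pvR ratings (ratings.length - 1)).getD i 0 = max (pvU ratings i) (pvDn ratings i) := by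
      intro i hi
      rw [hval i hi, if_pos (by omega)]
    have hvnone : (PySem.List.pyRange 0 (ratings.length:Int) 1).foldl
        (pvStepV ratings (ratings.length:Int) (pvR ratings (ratings.length - 1))) none = none := by
      apply foldl_stepV_none
      intro i hi
      rw [PySem.List.mem_pyRange_one] at hi
      exact no_violation ratings _ hval' i hi.1 hi.2
    rw [hvnone]
    have hsumA : (pvR ratings (ratings.length - 1)).sum
        = ∑ j ∈ Finset.range ratings.length, max (pvU ratings j) (pvDn ratings j) := by
      rw [list_sum_eq, hlen]
      exact Finset.sum_congr rfl (fun j hj => hval' j (Finset.mem_range.mp hj))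
    have hsumB := (pvInv_fold ratings hr).1
    rw [hsumA, hsumB]
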